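-- pv_equiv track=rewrite | github.com/robjwells/adventofcode-solutions | 2015/python/2015-11.py | clean_bad_letters
-- ===== SOURCE A (Python) =====
-- def clean_bad_letters(password):
--     """Return a candidate password after checking for invalid characters
--
--     If password doesn't contain the characters i, o, or l it is returned
--     immediately.
--
--     If it does, the string returned is the next potentially valid password
--     after short-circuiting and skipping passwords containing the invalid
--     letter in that particular position.
--
--     For example:
--         xi      ->   xj
--         xix     ->   xja
--         xixyz   ->   xjaaa
--     """
--     searches = [password.find(char) for char in 'iol']
--     if max(searches) == -1:
--         return password
--
--     cut_pos = min(x for x in searches if x != -1)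
--     new_letter = increment_letter(password[cut_pos])
--     count_a_to_add = len(password[cut_pos:]) - 1
--     return password[:cut_pos] + new_letter + 'a' * count_a_to_add
--
-- def increment_letter(letter):
--     """Return the character after `letter` in a restricted circular alphabet
--
--     This increments a single letter at a time: a becomes b,
--     z becomes a and so on.
--
--     i, o and l are excluded from the alphabet used as they are
--     not allowed to appear in valid passwords acccording to the
--     problem description.
--
--     It is, however, safe to increment those restricted letters
--     using this function as a special case is made for them.
--     """
--     restricted_dict = {'i': 'j', 'l': 'm', 'o': 'p'}
--     if letter in restricted_dict:
--         return restricted_dict[letter]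
--
--     ok_letters = 'abcdefghjkmnpqrstuvwxyz'
--     current_index = ok_letters.index(letter)
--     is_final_index = current_index == len(ok_letters) - 1
--     new_index = 0 if is_final_index else current_index + 1
--     return ok_letters[new_index]
-- ===== SOURCE B (Python) =====
-- def clean_bad_letters(password):
--     """Single left-to-right pass: cut at the first bad letter (i/o/l),
--     bump it within the alphabet and pad with 'a's."""
--     replacements = {'i': 'j', 'l': 'm', 'o': 'p'}
--     for pos, char in enumerate(password):
--         if char in replacements:
--             return (password[:pos] + replacements[char]
--                     + 'a' * (len(password) - pos - 1))
--     return password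
-- ===== Notes on version B (the rewrite author's own statement) =====
-- stated objective: alternative
-- what changed: A scans the whole string three times with str.find (one scan per bad letter), reduces the three hit positions with max/min and then re-indexes the string; B makes a single early-terminating left-to-right pass that stops at the first bad letter and builds the result from that position directly (it trades C-level str.find scans for one explicit Python loop).
import Mathlib
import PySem

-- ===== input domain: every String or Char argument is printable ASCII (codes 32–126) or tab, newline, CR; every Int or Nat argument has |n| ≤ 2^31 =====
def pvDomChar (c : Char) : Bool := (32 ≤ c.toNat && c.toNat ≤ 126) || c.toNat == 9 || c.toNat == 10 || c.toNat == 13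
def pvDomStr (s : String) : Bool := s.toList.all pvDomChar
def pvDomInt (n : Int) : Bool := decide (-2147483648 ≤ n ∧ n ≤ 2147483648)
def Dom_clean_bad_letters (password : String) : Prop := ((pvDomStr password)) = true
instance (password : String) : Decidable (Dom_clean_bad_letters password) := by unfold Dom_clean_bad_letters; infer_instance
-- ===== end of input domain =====

-- B replaces A's three whole-string find scans plus max/min reductions by one
-- early-terminating left-to-right pass that cuts at the first bad letter (objective: alternative single-pass algorithm).


-- ===== PORT A =====
-- same-module helper used by A; Python raises ValueError/IndexError where the port returns ""
-- (ok_letters.index miss, indexing out of range) — both branches are unreachable from clean_bad_letters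
def increment_letter (letter : String) : String :=
  let restricted_dict : PySem.Dict String String :=
    PySem.Dict.ofList [("i", "j"), ("l", "m"), ("o", "p")]
  if restricted_dict.contains letter then (restricted_dict.get? letter).getD ""
  else
    let ok_letters : String := "abcdefghjkmnpqrstuvwxyz"
    let current_index : Int := PySem.Str.find ok_letters letter
    if current_index = -1 then ""  -- Python: str.index raises ValueError
    else
      let is_final_index : Bool := current_index == PySem.Str.len ok_letters - 1
      let new_index : Int := if is_final_index then 0 else current_index + 1
      match PySem.Str.pyGet? ok_letters new_index with
      | some c => String.ofList [c]
      | none => ""  -- IndexError, unreachable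

def clean_bad_letters (password : String) : String :=
  let searches : List Int :=
    "iol".toList.map (fun ch => PySem.Str.find password (String.ofList [ch]))
  if PySem.List.max? searches (fun x => x) = some (-1) then password
  else
    match PySem.List.min? (searches.filter (fun x => !(x == -1))) (fun x => x) with
    | none => ""  -- Python: min() of empty raises ValueError; unreachable under the max guard
    | some cut_pos =>
      match PySem.Str.pyGet? password cut_pos with
      | none => ""  -- IndexError; unreachable (cut_pos is a found index)
      | some ch =>
        let new_letter := increment_letter (String.ofList [ch])
        let count_a_to_add : Int :=
          PySem.Str.len (PySem.Str.slice password (some cut_pos) none) - 1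
        PySem.Str.slice password none (some cut_pos) ++ new_letter
          ++ String.ofList (List.replicate count_a_to_add.toNat 'a')

-- ===== PORT B =====
def pvReplacements : PySem.Dict Char Char := PySem.Dict.ofList [('i', 'j'), ('l', 'm'), ('o', 'p')]

def pvScan (password : String) (cs : List Char) (pos : Nat) : String :=
  match cs with
  | [] => password
  | ch :: rest =>
    if pvReplacements.contains ch then
      PySem.Str.slice password none (some (pos : Int))
        ++ String.ofList [(pvReplacements.get? ch).getD ch]
        ++ String.ofList (List.replicate (PySem.Str.len password - (pos : Int) - 1).toNat 'a')
    else pvScan password rest (pos + 1)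

def clean_bad_letters_alt (password : String) : String :=
  pvScan password password.toList 0

-- ===== PRECONDITION & SPEC =====
def Spec_clean_bad_letters (password : String) (out : String) : Prop := out = clean_bad_letters_alt password
instance (password : String) (out : String) : Decidable (Spec_clean_bad_letters password out) := by unfold Spec_clean_bad_letters; infer_instance

-- ===== CLAIM (what is proved, stated in full; the proofs are below) =====
def Claim_equal_clean_bad_letters : Prop := ∀ (password : String), Dom_clean_bad_letters password → Spec_clean_bad_letters password (clean_bad_letters password)

-- ===== LEMMAS AND PROOFS =====

-- the string B returns when the first bad letter sits at index pos and is ch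
def pvOut (password : String) (pos : Nat) (ch : Char) : String :=
  PySem.Str.slice password none (some (pos : Int))
    ++ String.ofList [(pvReplacements.get? ch).getD ch]
    ++ String.ofList (List.replicate (PySem.Str.len password - (pos : Int) - 1).toNat 'a')

theorem pv_singleton_prefix_iff (c : Char) (l : List Char) : [c] <+: l ↔ l.head? = some c := by
  cases l with
  | nil => simp
  | cons h t => simp [List.cons_prefix_cons, eq_comm]

theorem pv_singleton_infix_iff (c : Char) (l : List Char) : [c] <:+: l ↔ c ∈ l := by
  constructor
  · intro h; exact h.mem (by simp)
  · intro h
    obtain ⟨i, hi, hget⟩ := List.mem_iff_getElem.1 h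
    exact ⟨l.take i, l.drop (i+1), by simp [← hget]⟩

theorem pv_find_singleton (cs : List Char) (c : Char) :
    PySem.Chars.find cs [c] =
      (match List.idxOf? c cs with
       | none => (-1 : Int)
       | some k => (k : Int)) := by
  cases h : List.idxOf? c cs with
  | none =>
    have hc : c ∉ cs := List.idxOf?_eq_none_iff.1 h
    exact (PySem.Chars.find_eq_neg_one_iff cs [c]).2 (by simpa [pv_singleton_infix_iff] using hc)
  | some k =>
    obtain ⟨hk, hck, hmin⟩ := List.idxOf?_eq_some_iff.1 h
    have hinf : [c] <:+: cs := (pv_singleton_infix_iff c cs).2 (hck ▸ List.getElem_mem hk)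
    have h0 : 0 ≤ PySem.Chars.find cs [c] := (PySem.Chars.find_nonneg_iff cs [c]).2 hinf
    obtain ⟨hpre, hfmin⟩ := PySem.Chars.find_spec h0
    have hhead : cs[(PySem.Chars.find cs [c]).toNat]? = some c := by
      have := (pv_singleton_prefix_iff c _).1 hpre
      simpa [List.head?_drop] using this
    have hn : (PySem.Chars.find cs [c]).toNat = k := by
      rcases List.getElem?_eq_some_iff.1 hhead with ⟨hlt, hgc⟩
      rcases Nat.lt_trichotomy (PySem.Chars.find cs [c]).toNat k with hlt' | he | hgt
      · exact absurd hgc (hmin _ hlt')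
      · exact he
      · exfalso
        exact hfmin k hgt ((pv_singleton_prefix_iff c _).2 (by simp [List.head?_drop, hck, hk]))
    show PySem.Chars.find cs [c] = (k : Int)
    omega

theorem pvScan_spec (password : String) (rest : List Char) (pos : Nat) :
    pvScan password rest pos =
      (match List.findIdx? (fun c => pvReplacements.contains c) rest with
       | none => password
       | some j => pvOut password (pos + j) (rest.getD j 'a')) := by
  induction rest generalizing pos with
  | nil => simp [pvScan]
  | cons ch rest ih =>
    by_cases hc : pvReplacements.contains ch
    · simp [pvScan, hc, List.findIdx?_cons, pvOut]
    · rw [pvScan]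
      simp only [hc, if_false, List.findIdx?_cons, Bool.false_eq_true]
      rw [ih]
      cases hrest : List.findIdx? (fun c => pvReplacements.contains c) rest with
      | none => simp
      | some j => simp [Nat.add_assoc, Nat.add_comm 1 j]

theorem pv_contains_iff (c : Char) :
    pvReplacements.contains c = true ↔ (c = 'i' ∨ c = 'l' ∨ c = 'o') := by
  constructor
  · intro h
    have hit : pvReplacements.items = [('i','j'),('l','m'),('o','p')] := rfl
    simp [PySem.Dict.contains, hit] at h
    simpa [eq_comm] using h
  · rintro (rfl | rfl | rfl) <;> decide

theorem pv_max3 (a b c : Int) : PySem.List.max? [a,b,c] (fun x => x) = some (max a (max b c)) := by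
  simp only [PySem.List.max?, List.foldl]
  split_ifs <;> (repeat' split) <;> simp_all <;> omega

theorem pv_min1 (a : Int) : PySem.List.min? [a] (fun x => x) = some a := rfl

theorem pv_min2 (a b : Int) : PySem.List.min? [a,b] (fun x => x) = some (min a b) := by
  simp only [PySem.List.min?, List.foldl]
  split_ifs <;> (repeat' split) <;> simp_all <;> omega

theorem pv_min3 (a b c : Int) : PySem.List.min? [a,b,c] (fun x => x) = some (min a (min b c)) := by
  simp only [PySem.List.min?, List.foldl]
  split_ifs <;> (repeat' split) <;> simp_all <;> omega

-- min/max bookkeeping over A's literal three-element searches list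
theorem pv_pick3 (a b c : Int) (j : Nat)
    (hone : a = (j : Int) ∨ b = (j : Int) ∨ c = (j : Int))
    (ha : a = -1 ∨ (j : Int) ≤ a) (hb : b = -1 ∨ (j : Int) ≤ b) (hc : c = -1 ∨ (j : Int) ≤ c) :
    ¬ PySem.List.max? [a, b, c] (fun x => x) = some (-1) ∧
      PySem.List.min? ([a, b, c].filter (fun x => !(x == -1))) (fun x => x) = some (j : Int) := by
  have h0 : (0:Int) ≤ (j:Int) := by positivity
  refine ⟨?_, ?_⟩
  · rw [pv_max3]; rcases hone with h | h | h <;> simp only [Option.some.injEq] <;> omega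
  · simp only [List.filter_cons, List.filter_nil]
    rcases hone with h | h | h <;> rcases ha with rfl | ha <;> rcases hb with rfl | hb <;>
      rcases hc with rfl | hc <;> split_ifs <;> simp_all [pv_min3, pv_min2, pv_min1] <;> omega

theorem pv_find_char (password : String) (c : Char) :
    PySem.Str.find password (String.ofList [c]) =
      (match List.idxOf? c password.toList with
       | none => (-1 : Int)
       | some k => (k : Int)) := by
  rw [PySem.Str.find_eq, String.toList_ofList, pv_find_singleton]

theorem clean_bad_letters_eq_canon (password : String) :
    clean_bad_letters password =
      (match List.findIdx? (fun c => pvReplacements.contains c) password.toList with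
       | none => password
       | some j => pvOut password j (password.toList.getD j 'a')) := by
  cases hF : List.findIdx? (fun c => pvReplacements.contains c) password.toList with
  | none =>
    have hall := List.findIdx?_eq_none_iff.1 hF
    have hni : List.idxOf? 'i' password.toList = none :=
      List.idxOf?_eq_none_iff.2 (fun hm => absurd (hall 'i' hm) (by decide))
    have hno : List.idxOf? 'o' password.toList = none :=
      List.idxOf?_eq_none_iff.2 (fun hm => absurd (hall 'o' hm) (by decide))
    have hnl : List.idxOf? 'l' password.toList = none :=
      List.idxOf?_eq_none_iff.2 (fun hm => absurd (hall 'l' hm) (by decide))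
    simp only [clean_bad_letters]
    rw [show ("iol".toList) = ['i','o','l'] from rfl]
    simp only [List.map, pv_find_char, hni, hno, hnl]
    rw [if_pos (by rw [pv_max3]; norm_num)]
  | some j =>
    obtain ⟨hj, hbadj, hpre⟩ := List.findIdx?_eq_some_iff_getElem.1 hF
    have hself : List.idxOf? password.toList[j] password.toList = some j := by
      refine List.idxOf?_eq_some_iff.2 ⟨hj, rfl, fun i hi he => hpre i hi ?_⟩
      rw [he]; exact hbadj
    have hge : ∀ (c : Char) (k : Nat), List.idxOf? c password.toList = some k →
        pvReplacements.contains c = true → j ≤ k := by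
      intro c k hk hcbad
      obtain ⟨hk', hck, -⟩ := List.idxOf?_eq_some_iff.1 hk
      by_contra hlt
      exact hpre k (by omega) (by rw [hck]; exact hcbad)
    have hFspec : ∀ (c : Char), pvReplacements.contains c = true →
        PySem.Str.find password (String.ofList [c]) = -1 ∨
          (j : Int) ≤ PySem.Str.find password (String.ofList [c]) := by
      intro c hc
      rw [pv_find_char]
      cases hk : List.idxOf? c password.toList with
      | none => exact Or.inl rfl
      | some k => exact Or.inr (by have := hge c k hk hc; simp; omega)
    have hFself : PySem.Str.find password (String.ofList [password.toList[j]]) = (j : Int) := by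
      rw [pv_find_char, hself]
    have hone : PySem.Str.find password (String.ofList ['i']) = (j : Int) ∨
        PySem.Str.find password (String.ofList ['o']) = (j : Int) ∨
        PySem.Str.find password (String.ofList ['l']) = (j : Int) := by
      rcases (pv_contains_iff password.toList[j]).1 hbadj with he | he | he
      · exact Or.inl (by rw [← he]; exact hFself)
      · exact Or.inr (Or.inr (by rw [← he]; exact hFself))
      · exact Or.inr (Or.inl (by rw [← he]; exact hFself))
    obtain ⟨hmax, hmin⟩ := pv_pick3 _ _ _ j hone
      (hFspec 'i' (by decide)) (hFspec 'o' (by decide)) (hFspec 'l' (by decide))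
    simp only [clean_bad_letters]
    rw [show ("iol".toList) = ['i','o','l'] from rfl]
    simp only [List.map]
    rw [if_neg hmax, hmin]
    -- the outer match now has a constructor scrutinee; simp iota-reduces it
    have hget : PySem.Str.pyGet? password ((j : Nat) : Int) = some password.toList[j] := by
      rw [PySem.Str.pyGet?_natCast]
      simp [hj]
    simp only [hget]
    have hlen : PySem.Str.len (PySem.Str.slice password (some ((j : Nat) : Int)) none) =
        (password.toList.length : Int) - (j : Int) := by
      rw [PySem.Str.len_eq]
      rw [show (PySem.Str.slice password (some ((j : Nat) : Int)) none).toList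
            = password.toList.drop j by
          rw [PySem.Str.toList_slice, PySem.Chars.slice_eq_listSlice,
              PySem.List.slice_from_natCast]]
      rw [List.length_drop]
      omega
    rw [pvOut, show password.toList.getD j 'a' = password.toList[j] from List.getD_eq_getElem _ _ hj]
    rw [hlen, PySem.Str.len_eq]
    rcases (pv_contains_iff password.toList[j]).1 hbadj with he | he | he <;> rw [he] <;>
      norm_num <;> rfl

-- ===== VERDICT (by name: the statement is the Claim_ definition above) =====
theorem clean_bad_letters_spec : Claim_equal_clean_bad_letters := by
  intro password _
  unfold Spec_clean_bad_letters
  rw [clean_bad_letters_eq_canon, clean_bad_letters_alt, pvScan_spec]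
  cases List.findIdx? (fun c => pvReplacements.contains c) password.toList <;> simp
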